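-- pv_equiv track=rewrite | github.com/kalkidan-hub/a2sv | Datastructure/camp1/leetcode/maximum-sum-obtained-of-any-permutation.py | maxSumRangeQuery
-- ===== SOURCE A (Python) =====
-- from typing import List
--
-- def maxSumRangeQuery(nums: List[int], requests: List[List[int]]) -> int:
--
--     # trace the frequency of the indexes
--     freq_tracer = [0]*(len(nums) + 1)
--
--     for req in requests:
--         freq_tracer[req[0]] += 1
--         freq_tracer[req[1] + 1] -= 1
--
--     frq_sum = [0]
--     for fr in freq_tracer:
--         frq_sum.append(frq_sum[-1] + fr)
--
--     frq_sum = frq_sum[1:-1]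
--
--     # maintain the permutation where the values of the nums are placed in such a way that if we sort the frq_sum and nums
--     # with their index goes attached to the value, we end up getting the exact same index distribution,
--
--
--     # frq_sum and nums transformation
--
--     frq_sum = sorted(list(enumerate(frq_sum)), key= lambda x:x[1])
--     nums = sorted(list(enumerate(nums)), key= lambda x:x[1])
--
--
--
--     new_nums = [0]*len(nums) # the permutation of nums that maximizes our request
--
--     for i in range(len(nums)):
--         new_nums[frq_sum[i][0]] = nums[i][1]
--
--     # calculate the prefix sum of the new_nums and get the result
--
--     prf_sum = [0]
--     for p in new_nums:
--         prf_sum.append(prf_sum[-1] + p)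
--
--     total = 0
--
--     for req in requests:
--         total += (prf_sum[req[1] + 1] - prf_sum[req[0]])
--
--     return total%(10**9 + 7)
-- ===== SOURCE B (Python) =====
-- def maxSumRangeQuery(nums, requests):
--     # difference array -> per-index coverage counts
--     diff = [0] * (len(nums) + 1)
--     for req in requests:
--         diff[req[0]] += 1
--         diff[req[1] + 1] -= 1
--     cov = []
--     run = 0
--     for i in range(len(nums)):
--         run += diff[i]
--         cov.append(run)
--     # pair largest coverage with largest value: dot product of the two sorted lists
--     total = sum(f * v for f, v in zip(sorted(cov), sorted(nums)))
--     return total % (10 ** 9 + 7)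
-- ===== Notes on version B (the rewrite author's own statement) =====
-- stated objective: simpler
-- what changed: B keeps A's difference-array pass but replaces the index-attached sorts, the explicit permuted array, its prefix sums and the second loop over requests by a single dot product of the sorted coverage list with the sorted nums list.
import Mathlib
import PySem

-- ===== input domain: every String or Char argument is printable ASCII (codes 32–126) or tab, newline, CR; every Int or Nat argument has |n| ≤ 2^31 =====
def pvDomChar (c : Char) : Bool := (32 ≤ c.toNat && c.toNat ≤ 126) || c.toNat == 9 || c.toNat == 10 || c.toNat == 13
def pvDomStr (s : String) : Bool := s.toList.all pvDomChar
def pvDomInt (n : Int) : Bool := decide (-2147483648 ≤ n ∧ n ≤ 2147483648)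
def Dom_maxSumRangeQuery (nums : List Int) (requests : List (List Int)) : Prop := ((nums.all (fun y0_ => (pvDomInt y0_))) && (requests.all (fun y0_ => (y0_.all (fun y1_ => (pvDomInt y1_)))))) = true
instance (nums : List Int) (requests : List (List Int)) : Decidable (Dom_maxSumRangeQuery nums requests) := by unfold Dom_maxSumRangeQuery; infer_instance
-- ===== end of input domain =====

-- B keeps A's difference-array coverage pass but replaces the index-attached sorts, the explicit
-- permuted array, its prefix sums and the second loop over requests by a single dot product of the
-- sorted coverage list with the sorted nums list (objective: simpler).

-- ===== PORT A =====
-- the difference-array pass over the requests (identical source code in A and in B; shared helper)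
def pvDiffArr (nums : List Int) (requests : List (List Int)) : List Int :=
  requests.foldl (fun ft req =>
      let ft1 := PySem.List.pySetD ft (PySem.List.pyGetD req 0 0)
                  (PySem.List.pyGetD ft (PySem.List.pyGetD req 0 0) 0 + 1)
      PySem.List.pySetD ft1 (PySem.List.pyGetD req 1 0 + 1)
                  (PySem.List.pyGetD ft1 (PySem.List.pyGetD req 1 0 + 1) 0 - 1))
    (List.replicate (nums.length + 1) (0 : Int))

def maxSumRangeQuery (nums : List Int) (requests : List (List Int)) : Int :=
  let freq_tracer := pvDiffArr nums requests
  let frq_sum0 := freq_tracer.foldl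
      (fun acc fr => acc ++ [PySem.List.pyGetD acc (-1) 0 + fr]) [(0 : Int)]
  let frq_sum1 := PySem.List.slice frq_sum0 (some 1) (some (-1))
  let frq_sum := PySem.List.sorted (PySem.List.enumerate frq_sum1 0) (fun x => x.2) false
  let nums2 := PySem.List.sorted (PySem.List.enumerate nums 0) (fun x => x.2) false
  let new_nums := (PySem.List.pyRange 0 (nums2.length : Int) 1).foldl
      (fun nn i => PySem.List.pySetD nn (PySem.List.pyGetD frq_sum i ((0:Int),(0:Int))).1
                     (PySem.List.pyGetD nums2 i ((0:Int),(0:Int))).2)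
      (List.replicate nums2.length (0 : Int))
  let prf_sum := new_nums.foldl
      (fun acc p => acc ++ [PySem.List.pyGetD acc (-1) 0 + p]) [(0 : Int)]
  let total := requests.foldl (fun t req =>
      t + (PySem.List.pyGetD prf_sum (PySem.List.pyGetD req 1 0 + 1) 0
           - PySem.List.pyGetD prf_sum (PySem.List.pyGetD req 0 0) 0)) 0
  PySem.Int.mod total (10 ^ 9 + 7)

-- ===== PORT B =====
def maxSumRangeQuery_alt (nums : List Int) (requests : List (List Int)) : Int :=
  let diff := pvDiffArr nums requests
  let cov := ((PySem.List.pyRange 0 (nums.length : Int) 1).foldl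
      (fun (st : Int × List Int) i =>
        let run := st.1 + PySem.List.pyGetD diff i 0
        (run, st.2 ++ [run])) ((0 : Int), ([] : List Int))).2
  let total := (((PySem.List.sorted cov (fun x => x) false).zip
                 (PySem.List.sorted nums (fun x => x) false)).map (fun p => p.1 * p.2)).sum
  PySem.Int.mod total (10 ^ 9 + 7)

-- ===== PRECONDITION & SPEC =====
-- Pre_ is exactly A's no-raise condition: each request must carry at least two entries and its two
-- endpoints must be in Python indexing range of the length-(n+1) difference/prefix arrays.
def Pre_maxSumRangeQuery (nums : List Int) (requests : List (List Int)) : Prop :=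
  ∀ r ∈ requests, 2 ≤ r.length
    ∧ PySem.Raise.InRange (nums.length + 1) (r.getD 0 0)
    ∧ PySem.Raise.InRange (nums.length + 1) (r.getD 1 0 + 1)
instance (nums : List Int) (requests : List (List Int)) : Decidable (Pre_maxSumRangeQuery nums requests) := by
  unfold Pre_maxSumRangeQuery; infer_instance
def pvWitness_maxSumRangeQuery : List Int × List (List Int) := ([3, -1, 4], [[0, 1], [1, 2], [2, 0]])

def Spec_maxSumRangeQuery (nums : List Int) (requests : List (List Int)) (out : Int) : Prop :=
  out = maxSumRangeQuery_alt nums requests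
instance (nums : List Int) (requests : List (List Int)) (out : Int) : Decidable (Spec_maxSumRangeQuery nums requests out) := by
  unfold Spec_maxSumRangeQuery; infer_instance

-- ===== CLAIM (what is proved, stated in full; the proofs are below) =====
def Claim_equal_maxSumRangeQuery : Prop := ∀ (nums : List Int) (requests : List (List Int)), Dom_maxSumRangeQuery nums requests → Pre_maxSumRangeQuery nums requests → Spec_maxSumRangeQuery nums requests (maxSumRangeQuery nums requests)

-- ===== LEMMAS AND PROOFS =====

-- Python's wrapped index for an in-range index into a list of length `len`
def pvW (len : Nat) (i : Int) : Nat := if 0 ≤ i then i.toNat else len - (-i).toNat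

-- partial-sum value F_i of a difference array
def pvF (d : List Int) (i : Nat) : Int := (d.take (i + 1)).sum

-- the frequency-weighted sum Σ_i F_i(d) * new[i]
def pvPhi (d new : List Int) : Int :=
  ((List.range new.length).map (fun i => pvF d i * new.getD i 0)).sum

-- prefix sum Σ_{i<k} new[i]
def pvSP (new : List Int) (k : Nat) : Int := ((List.range k).map (fun i => new.getD i 0)).sum

theorem pvW_lt (len : Nat) (i : Int) (h : PySem.Raise.InRange len i) : pvW len i < len := by
  simp only [PySem.Raise.InRange] at h
  unfold pvW; split_ifs <;> omega

theorem pyGetD_wrap {α : Type} (xs : List α) (i : Int) (d : α)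
    (h : PySem.Raise.InRange xs.length i) :
    PySem.List.pyGetD xs i d = xs.getD (pvW xs.length i) d := by
  obtain ⟨h1, h2⟩ := h
  simp only [PySem.List.pyGetD, PySem.List.pyGet?, PySem.List.pyIdx?, pvW, List.getD_eq_getElem?_getD]
  split_ifs with ha <;> simp <;> omega

theorem pySetD_wrap {α : Type} (xs : List α) (i : Int) (v : α)
    (h : PySem.Raise.InRange xs.length i) :
    PySem.List.pySetD xs i v = xs.set (pvW xs.length i) v := by
  obtain ⟨h1, h2⟩ := h
  simp only [PySem.List.pySetD, PySem.List.pySet?, PySem.List.pyIdx?, pvW]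
  split_ifs with ha <;> simp <;> omega

theorem scan_fold (l : List Int) : ∀ (pre : List Int) (g : Int),
    l.foldl (fun acc fr => acc ++ [PySem.List.pyGetD acc (-1) 0 + fr]) (pre ++ [g])
      = (pre ++ [g]) ++ (List.range l.length).map (fun k => g + (l.take (k + 1)).sum) := by
  induction l with
  | nil => intro pre g; simp
  | cons x xs ih =>
    intro pre g
    simp only [List.foldl_cons, PySem.List.pyGetD_neg_one_append_singleton]
    rw [show (pre ++ [g] ++ [g + x]) = ((pre ++ [g]) ++ [g + x]) by simp, ih]
    simp only [List.length_cons, List.range_succ_eq_map, List.map_cons, List.map_map]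
    simp [Function.comp, List.take_succ_cons, add_assoc]

theorem cov_fold (d : List Int) : ∀ (m : Nat), m ≤ d.length →
    (List.range m).foldl (fun (st : Int × List Int) k =>
        (st.1 + d.getD k 0, st.2 ++ [st.1 + d.getD k 0])) ((0 : Int), ([] : List Int))
      = ((d.take m).sum, (List.range m).map (fun k => (d.take (k + 1)).sum)) := by
  intro m
  induction m with
  | zero => intro; simp
  | succ m ih =>
    intro hm
    rw [List.range_succ, List.foldl_append, ih (by omega)]
    have hg : d.getD m 0 = d[m] := by
      rw [List.getD_eq_getElem?_getD, List.getElem?_eq_getElem (by omega)]; rfl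
    simp only [List.foldl_cons, List.foldl_nil, List.map_append, List.map_cons, List.map_nil]
    rw [List.sum_take_succ d m (by omega), hg]
    simp [List.sum_take_succ d m (by omega), hg]
    rfl

theorem foldl_upd_len (reqs : List (List Int)) : ∀ (d0 : List Int),
    (reqs.foldl (fun ft req =>
      let ft1 := PySem.List.pySetD ft (PySem.List.pyGetD req 0 0)
                  (PySem.List.pyGetD ft (PySem.List.pyGetD req 0 0) 0 + 1)
      PySem.List.pySetD ft1 (PySem.List.pyGetD req 1 0 + 1)
                  (PySem.List.pyGetD ft1 (PySem.List.pyGetD req 1 0 + 1) 0 - 1)) d0).length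
      = d0.length := by
  induction reqs with
  | nil => intro; simp
  | cons r rs ih =>
    intro d0
    simp only [List.foldl_cons]
    rw [ih]
    simp [PySem.List.length_pySetD]

theorem slice_one_negone {α : Type} (xs : List α) :
    PySem.List.slice xs (some 1) (some (-1)) = xs.tail.dropLast := by
  cases xs with
  | nil => simp [PySem.List.slice, PySem.List.clampIdx]
  | cons x t =>
    simp only [PySem.List.slice, PySem.List.clampIdx, List.dropLast_eq_take, List.tail_cons]
    norm_num
    rw [if_neg (by omega)]
    omega

theorem sum_map_add (l : List Nat) (f g : Nat → Int) :
    (l.map (fun i => f i + g i)).sum = (l.map f).sum + (l.map g).sum := by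
  induction l with
  | nil => simp
  | cons a l ih => simp [ih]; ring

theorem sum_set_eq (l : List Int) (p : Nat) (v : Int) (h : p < l.length) :
    (l.set p v).sum = l.sum + v - l.getD p 0 := by
  rw [List.sum_set]
  have h2 := List.sum_take_add_sum_drop l p
  rw [List.drop_eq_getElem_cons h] at h2
  simp only [List.sum_cons] at h2
  rw [List.getD_eq_getElem?_getD, List.getElem?_eq_getElem h]
  simp only [Option.getD_some, if_pos h]
  omega

theorem sum_ite_tail (h : Nat → Int) (c : Int) (p : Nat) : ∀ (n : Nat), p ≤ n →
    ((List.range n).map (fun i => (if p ≤ i then c else 0) * h i)).sum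
      = c * (((List.range n).map h).sum - ((List.range p).map h).sum) := by
  intro n
  induction n with
  | zero => intro hp; interval_cases p; simp
  | succ n ih =>
    intro hp
    rcases Nat.lt_or_ge n p with hc | hc
    · have hpn : p = n + 1 := by omega
      subst hpn
      have : ∀ i ∈ List.range (n + 1), (if n + 1 ≤ i then c else 0) * h i = 0 := by
        intro i hi
        rw [List.mem_range] at hi
        rw [if_neg (by omega)]; ring
      rw [List.map_congr_left this]
      simp [List.sum_replicate]
    · rw [List.range_succ, List.map_append, List.map_append, List.sum_append, List.sum_append,
          ih hc]
      simp only [List.map_cons, List.map_nil, List.sum_cons, List.sum_nil]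
      rw [if_pos hc]
      ring

theorem pvF_set (d : List Int) (p : Nat) (v : Int) (hp : p < d.length) (i : Nat) :
    pvF (d.set p v) i = pvF d i + (if p ≤ i then v - d.getD p 0 else 0) := by
  unfold pvF
  rw [List.take_set]
  by_cases hpi : p ≤ i
  · rw [sum_set_eq _ p v (by simp [List.length_take]; omega)]
    have : (d.take (i + 1)).getD p 0 = d.getD p 0 := by
      rw [List.getD_eq_getElem?_getD, List.getD_eq_getElem?_getD, List.getElem?_take]
      simp [Nat.lt_succ_of_le hpi]
    rw [this, if_pos hpi]
    ring
  · rw [if_neg hpi, List.set_eq_of_length_le (by simp [List.length_take]; omega)]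
    ring

theorem phi_bump (d new : List Int) (p : Nat) (v : Int)
    (hp : p < d.length) (hpn : p ≤ new.length) :
    pvPhi (d.set p v) new
      = pvPhi d new + (v - d.getD p 0) * (pvSP new new.length - pvSP new p) := by
  unfold pvPhi
  rw [List.map_congr_left (fun i _ => by rw [pvF_set d p v hp i]; ring :
      ∀ i ∈ List.range new.length, pvF (d.set p v) i * new.getD i 0
        = pvF d i * new.getD i 0 + (if p ≤ i then v - d.getD p 0 else 0) * new.getD i 0)]
  rw [sum_map_add, sum_ite_tail (fun i => new.getD i 0) (v - d.getD p 0) p new.length hpn]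
  unfold pvSP
  ring

theorem sum_take_eq_SP (new : List Int) : ∀ (k : Nat), k ≤ new.length →
    (new.take k).sum = pvSP new k := by
  intro k
  induction k with
  | zero => intro; simp [pvSP]
  | succ k ih =>
    intro hk
    rw [List.sum_take_succ _ k (by omega)]
    unfold pvSP
    rw [List.range_succ, List.map_append, List.sum_append]
    unfold pvSP at ih
    rw [ih (by omega)]
    simp [List.getD_eq_getElem?_getD, List.getElem?_eq_getElem (show k < new.length by omega)]

theorem phi_fold (new : List Int) (reqs : List (List Int)) : ∀ (d0 : List Int),
    d0.length = new.length + 1 →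
    (∀ r ∈ reqs, PySem.Raise.InRange (new.length + 1) (PySem.List.pyGetD r 0 0)
        ∧ PySem.Raise.InRange (new.length + 1) (PySem.List.pyGetD r 1 0 + 1)) →
    pvPhi (reqs.foldl (fun ft req =>
      let ft1 := PySem.List.pySetD ft (PySem.List.pyGetD req 0 0)
                  (PySem.List.pyGetD ft (PySem.List.pyGetD req 0 0) 0 + 1)
      PySem.List.pySetD ft1 (PySem.List.pyGetD req 1 0 + 1)
                  (PySem.List.pyGetD ft1 (PySem.List.pyGetD req 1 0 + 1) 0 - 1)) d0) new
      = pvPhi d0 new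
        + (reqs.map (fun r => pvSP new (pvW (new.length + 1) (PySem.List.pyGetD r 1 0 + 1))
            - pvSP new (pvW (new.length + 1) (PySem.List.pyGetD r 0 0)))).sum := by
  induction reqs with
  | nil => intro d0 _ _; simp
  | cons r rs ih =>
    intro d0 hlen hr
    simp only [List.foldl_cons, List.map_cons, List.sum_cons]
    obtain ⟨hia, hib⟩ := hr r List.mem_cons_self
    have hia' : PySem.Raise.InRange d0.length (PySem.List.pyGetD r 0 0) := by rw [hlen]; exact hia
    rw [pySetD_wrap d0 _ _ hia', pyGetD_wrap d0 _ _ hia', hlen]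
    set wa := pvW (new.length + 1) (PySem.List.pyGetD r 0 0) with hwa
    set d1 := d0.set wa (d0.getD wa 0 + 1) with hd1
    have hd1len : d1.length = new.length + 1 := by simp [hd1, hlen]
    have hib' : PySem.Raise.InRange d1.length (PySem.List.pyGetD r 1 0 + 1) := by
      rw [hd1len]; exact hib
    rw [pySetD_wrap d1 _ _ hib', pyGetD_wrap d1 _ _ hib', hd1len]
    set wb := pvW (new.length + 1) (PySem.List.pyGetD r 1 0 + 1) with hwb
    set d2 := d1.set wb (d1.getD wb 0 - 1) with hd2
    have hd2len : d2.length = new.length + 1 := by simp [hd2, hd1len]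
    rw [ih d2 hd2len (fun x hx => hr x (List.mem_cons_of_mem _ hx))]
    have hwalt := pvW_lt _ _ hia
    have hwblt := pvW_lt _ _ hib
    rw [hd2, phi_bump d1 new wb _ (by omega) (by omega)]
    rw [hd1, phi_bump d0 new wa _ (by omega) (by omega)]
    ring

theorem fold2 : ∀ (a b : List (Int × Int)) (init : List Int), a.length = b.length →
    (List.range a.length).foldl (fun nn k =>
        PySem.List.pySetD nn (a.getD k ((0:Int),(0:Int))).1 (b.getD k ((0:Int),(0:Int))).2) init
      = (a.zip b).foldl (fun nn p => PySem.List.pySetD nn p.1.1 p.2.2) init := by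
  intro a
  induction a with
  | nil => intro b init h; simp
  | cons pa as ih =>
    intro b init h
    cases b with
    | nil => simp at h
    | cons pb bs =>
      simp only [List.length_cons, List.range_succ_eq_map, List.foldl_cons, List.foldl_map,
        List.getD_cons_zero, List.zip_cons_cons]
      rw [show (fun (nn : List Int) (k : Nat) =>
            PySem.List.pySetD nn ((pa :: as).getD (k.succ) ((0:Int),(0:Int))).1
              ((pb :: bs).getD (k.succ) ((0:Int),(0:Int))).2)
          = (fun nn k => PySem.List.pySetD nn (as.getD k ((0:Int),(0:Int))).1
              (bs.getD k ((0:Int),(0:Int))).2) from by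
        funext nn k; rw [List.getD_cons_succ, List.getD_cons_succ]]
      exact ih bs _ (by simpa using h)

theorem write_skip (L : List ((Int × Int) × (Int × Int))) : ∀ (arr : List Int) (j : Nat),
    (∀ p ∈ L, 0 ≤ p.1.1) → (∀ p ∈ L, p.1.1.toNat ≠ j) →
    (L.foldl (fun nn p => PySem.List.pySetD nn p.1.1 p.2.2) arr).getD j 0 = arr.getD j 0 := by
  induction L with
  | nil => intro arr j _ _; rfl
  | cons q Ls ih =>
    intro arr j h0 hne
    simp only [List.foldl_cons]
    rw [ih _ j (fun p hp => h0 p (List.mem_cons_of_mem _ hp))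
          (fun p hp => hne p (List.mem_cons_of_mem _ hp))]
    rw [PySem.List.pySetD_of_nonneg _ _ (h0 q (List.mem_cons_self))]
    rw [List.getD_eq_getElem?_getD, List.getD_eq_getElem?_getD,
        List.getElem?_set_ne (hne q List.mem_cons_self)]

theorem write_len (L : List ((Int × Int) × (Int × Int))) : ∀ (arr : List Int),
    (L.foldl (fun nn p => PySem.List.pySetD nn p.1.1 p.2.2) arr).length = arr.length := by
  induction L with
  | nil => intro; rfl
  | cons q Ls ih => intro arr; simp only [List.foldl_cons]; rw [ih]; simp [PySem.List.length_pySetD]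

theorem write_hit (L : List ((Int × Int) × (Int × Int))) : ∀ (arr : List Int),
    (L.map (fun p => p.1.1)).Nodup →
    (∀ p ∈ L, 0 ≤ p.1.1 ∧ p.1.1 < (arr.length : Int)) →
    ∀ p ∈ L, (L.foldl (fun nn q => PySem.List.pySetD nn q.1.1 q.2.2) arr).getD p.1.1.toNat 0 = p.2.2 := by
  induction L with
  | nil => intro arr _ _ p hp; cases hp
  | cons q Ls ih =>
    intro arr hnd hb p hp
    simp only [List.map_cons, List.nodup_cons] at hnd
    rcases List.mem_cons.mp hp with rfl | hmem
    · simp only [List.foldl_cons]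
      rw [write_skip Ls _ p.1.1.toNat
            (fun x hx => (hb x (List.mem_cons_of_mem _ hx)).1)
            (fun x hx hxx => by
              have h1 := (hb x (List.mem_cons_of_mem _ hx)).1
              have h2 := (hb p List.mem_cons_self).1
              exact hnd.1 (List.mem_map.mpr ⟨x, hx, by omega⟩))]
      rw [PySem.List.pySetD_of_nonneg _ _ (hb p List.mem_cons_self).1]
      rw [List.getD_eq_getElem?_getD, List.getElem?_set_self
            (by have := (hb p List.mem_cons_self); omega)]
      rfl
    · simp only [List.foldl_cons]
      exact ih _ hnd.2
        (fun x hx => by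
          have := hb x (List.mem_cons_of_mem _ hx)
          simpa [PySem.List.length_pySetD] using this) p hmem

theorem prefix_getD (xs : List Int) (k : Nat) (hk : k ≤ xs.length) :
    ((0:Int) :: (List.range xs.length).map (fun j => (xs.take (j + 1)).sum)).getD k 0
      = (xs.take k).sum := by
  cases k with
  | zero => simp
  | succ k =>
    rw [List.getD_cons_succ, List.getD_eq_getElem?_getD, List.getElem?_map,
        List.getElem?_range (by omega)]
    simp

theorem map_snd_sorted_enum (xs : List Int) :
    (PySem.List.sorted (PySem.List.enumerate xs 0) (fun x => x.2) false).map (fun x => x.2)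
      = PySem.List.sorted xs (fun x => x) false := by
  symm
  apply PySem.List.sorted_id_eq_of_perm_of_pairwise
  · have := (PySem.List.sorted_perm (PySem.List.enumerate xs 0) (fun x => x.2) false).map
      (fun x : Int × Int => x.2)
    rwa [PySem.List.map_snd_enumerate] at this
  · exact List.Pairwise.map _ (fun a b hab => hab)
      (PySem.List.sorted_pairwise (PySem.List.enumerate xs 0) (fun x => x.2))

-- ===== VERDICT (by name: the statement is the Claim_ definition above) =====
theorem maxSumRangeQuery_spec : Claim_equal_maxSumRangeQuery := by
  intro nums requests _dom hpre
  unfold Spec_maxSumRangeQuery maxSumRangeQuery maxSumRangeQuery_alt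
  dsimp only
  congr 1
  set n := nums.length with hn
  set d := pvDiffArr nums requests with hd
  have hdlen : d.length = n + 1 := by
    rw [hd]; unfold pvDiffArr; rw [foldl_upd_len]; simp [hn]
  -- A's scan list over d
  have hscan : d.foldl (fun acc fr => acc ++ [PySem.List.pyGetD acc (-1) 0 + fr]) [(0:Int)]
      = (0:Int) :: (List.range d.length).map (fun k => (d.take (k + 1)).sum) := by
    have h0 := scan_fold d [] 0
    simpa using h0
  rw [hscan, slice_one_negone]
  simp only [List.tail_cons]
  rw [hdlen, List.range_succ, List.map_append]
  simp only [List.map_cons, List.map_nil]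
  rw [List.dropLast_concat]
  -- B's coverage list over d
  rw [PySem.List.pyRange_zero_natCast n, List.foldl_map]
  simp only [PySem.List.pyGetD_natCast]
  rw [cov_fold d n (by omega)]
  dsimp only
  set F := List.map (fun k => (List.take (k + 1) d).sum) (List.range n) with hF
  set fs := PySem.List.sorted (PySem.List.enumerate F 0) (fun x => x.2) false with hfs
  set ns := PySem.List.sorted (PySem.List.enumerate nums 0) (fun x => x.2) false with hns
  have hFlen : F.length = n := by rw [hF]; simp
  have hfslen : fs.length = n := by
    rw [hfs]; rw [PySem.List.length_sorted, PySem.List.length_enumerate, hFlen]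
  have hnslen : ns.length = n := by
    rw [hns]; rw [PySem.List.length_sorted, PySem.List.length_enumerate]
  rw [hnslen]
  rw [PySem.List.pyRange_zero_natCast n, List.foldl_map]
  simp only [PySem.List.pyGetD_natCast]
  rw [show List.range n = List.range fs.length from by rw [hfslen]]
  rw [fold2 fs ns _ (by rw [hfslen, hnslen])]
  set new := (fs.zip ns).foldl (fun nn p => PySem.List.pySetD nn p.1.1 p.2.2)
      (List.replicate n 0) with hnew
  have hnewlen : new.length = n := by rw [hnew, write_len]; simp
  -- A's prefix-sum list over new
  have hscan2 : new.foldl (fun acc p => acc ++ [PySem.List.pyGetD acc (-1) 0 + p]) [(0:Int)]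
      = (0:Int) :: (List.range new.length).map (fun k => (new.take (k + 1)).sum) := by
    have h0 := scan_fold new [] 0
    simpa using h0
  rw [hscan2]
  -- A's final request loop is a mapped sum
  rw [PySem.List.foldl_add requests _ 0, zero_add]
  -- rewrite each request's contribution through the wrapped prefix sums
  have hmap : requests.map (fun req =>
        PySem.List.pyGetD ((0:Int) :: (List.range new.length).map (fun k => (new.take (k + 1)).sum))
          (PySem.List.pyGetD req 1 0 + 1) 0
        - PySem.List.pyGetD ((0:Int) :: (List.range new.length).map (fun k => (new.take (k + 1)).sum))
          (PySem.List.pyGetD req 0 0) 0)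
      = requests.map (fun r => pvSP new (pvW (new.length + 1) (PySem.List.pyGetD r 1 0 + 1))
          - pvSP new (pvW (new.length + 1) (PySem.List.pyGetD r 0 0))) := by
    apply List.map_congr_left
    intro r hr
    obtain ⟨hrlen, hA, hB⟩ := hpre r hr
    have hga : PySem.List.pyGetD r 0 0 = r.getD 0 0 := PySem.List.pyGetD_zero r 0
    have hgb : PySem.List.pyGetD r 1 0 = r.getD 1 0 := PySem.List.pyGetD_ofNat' r 1 0
    have hprflen : ((0:Int) :: (List.range new.length).map
        (fun k => (new.take (k + 1)).sum)).length = new.length + 1 := by simp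
    have hA' : PySem.Raise.InRange ((0:Int) :: (List.range new.length).map
        (fun k => (new.take (k + 1)).sum)).length (PySem.List.pyGetD r 0 0) := by
      rw [hprflen, hga, hnewlen]; exact hA
    have hB' : PySem.Raise.InRange ((0:Int) :: (List.range new.length).map
        (fun k => (new.take (k + 1)).sum)).length (PySem.List.pyGetD r 1 0 + 1) := by
      rw [hprflen, hgb, hnewlen]; exact hB
    rw [pyGetD_wrap _ _ _ hA', pyGetD_wrap _ _ _ hB', hprflen]
    have hwalt : pvW (new.length + 1) (PySem.List.pyGetD r 0 0) < new.length + 1 := by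
      apply pvW_lt; rw [hga, hnewlen]; exact hA
    have hwblt : pvW (new.length + 1) (PySem.List.pyGetD r 1 0 + 1) < new.length + 1 := by
      apply pvW_lt; rw [hgb, hnewlen]; exact hB
    rw [prefix_getD new _ (by omega), prefix_getD new _ (by omega)]
    rw [sum_take_eq_SP new _ (by omega), sum_take_eq_SP new _ (by omega)]
  rw [hmap]
  -- the difference-array invariant: the mapped sum is the frequency-weighted sum
  have hphi0 : pvPhi (List.replicate (nums.length + 1) (0:Int)) new = 0 := by
    have hz : ∀ i ∈ List.range new.length,
        pvF (List.replicate (nums.length + 1) (0:Int)) i * new.getD i 0 = (0:Int) := by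
      intro i _
      simp [pvF, List.take_replicate, List.sum_replicate]
    unfold pvPhi
    rw [List.map_congr_left hz]
    simp
  have hphi := phi_fold new requests (List.replicate (nums.length + 1) 0)
    (by simp [hnewlen, ← hn])
    (fun r hr => by
      obtain ⟨hrlen, hA, hB⟩ := hpre r hr
      refine ⟨?_, ?_⟩
      · rw [PySem.List.pyGetD_zero, hnewlen]; exact hA
      · rw [PySem.List.pyGetD_ofNat', hnewlen]; exact hB)
  have hdeq : pvDiffArr nums requests = requests.foldl (fun ft req =>
      let ft1 := PySem.List.pySetD ft (PySem.List.pyGetD req 0 0)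
                  (PySem.List.pyGetD ft (PySem.List.pyGetD req 0 0) 0 + 1)
      PySem.List.pySetD ft1 (PySem.List.pyGetD req 1 0 + 1)
                  (PySem.List.pyGetD ft1 (PySem.List.pyGetD req 1 0 + 1) 0 - 1))
    (List.replicate (nums.length + 1) 0) := rfl
  rw [← hdeq, ← hd] at hphi
  rw [show (requests.map (fun r => pvSP new (pvW (new.length + 1) (PySem.List.pyGetD r 1 0 + 1))
          - pvSP new (pvW (new.length + 1) (PySem.List.pyGetD r 0 0)))).sum
      = pvPhi d new from by rw [hphi, hphi0, zero_add]]
  -- sort projections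
  rw [← map_snd_sorted_enum F, ← map_snd_sorted_enum nums, ← hfs, ← hns]
  rw [List.zip_map, List.map_map]
  -- permutation and membership facts about fs
  have hperm : (fs.map (fun p => p.1)).Perm (PySem.List.pyRange 0 (n : Int) 1) := by
    have h1 := (PySem.List.sorted_perm (PySem.List.enumerate F 0) (fun x => x.2) false).map
      (fun p : Int × Int => p.1)
    rw [PySem.List.map_fst_enumerate] at h1
    rw [← hfs] at h1
    simpa [hFlen] using h1
  have hnodup : (fs.map (fun p => p.1)).Nodup := by
    refine hperm.nodup_iff.mpr ?_
    rw [PySem.List.pyRange_zero_natCast]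
    exact List.Nodup.map (fun a b => by omega) (List.nodup_range)
  have hmemfs : ∀ p ∈ fs, ∃ k, k < n ∧ p = ((k : Int), pvF d k) := by
    intro p hp
    have hp2 : p ∈ PySem.List.enumerate F 0 :=
      (PySem.List.sorted_perm (PySem.List.enumerate F 0) (fun x => x.2) false).subset hp
    rw [PySem.List.mem_enumerate_iff] at hp2
    obtain ⟨k, hk, hpe⟩ := hp2
    refine ⟨k, by rw [hFlen] at hk; exact hk, ?_⟩
    rw [hpe]
    simp [hF, pvF]
  have hzlen : (fs.zip ns).length = n := by simp [hfslen, hnslen]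
  have hnodup' : ((fs.zip ns).map (fun p => p.1.1)).Nodup := by
    rw [show (fun p : (Int × Int) × (Int × Int) => p.1.1)
          = ((fun x : Int × Int => x.1) ∘ Prod.fst) from rfl, ← List.map_map,
        List.map_fst_zip (by rw [hfslen, hnslen])]
    exact hnodup
  have hbounds : ∀ p ∈ fs.zip ns, 0 ≤ p.1.1 ∧ p.1.1 < ((List.replicate n (0:Int)).length : Int) := by
    intro p hp
    obtain ⟨hp1, _⟩ := List.of_mem_zip hp
    obtain ⟨m', hm', hpe'⟩ := hmemfs p.1 hp1
    rw [hpe']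
    simp only [List.length_replicate]
    exact ⟨by positivity, by exact_mod_cast hm'⟩
  -- reindex the frequency-weighted sum along the sort permutation
  unfold pvPhi
  rw [hnewlen]
  rw [show (List.range n).map (fun i => pvF d i * new.getD i 0)
      = (PySem.List.pyRange 0 (n : Int) 1).map (fun j => pvF d j.toNat * new.getD j.toNat 0) from by
    rw [PySem.List.pyRange_zero_natCast, List.map_map]
    symm
    apply List.map_congr_left
    intro i _
    simp]
  rw [← (hperm.map (fun j : Int => pvF d j.toNat * new.getD j.toNat 0)).sum_eq]
  rw [List.map_map]
  apply congrArg List.sum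
  apply List.ext_getElem
  · simp [hfslen, hnslen]
  · intro k h1 h2
    have hk : k < n := by rw [List.length_map, hfslen] at h1; exact h1
    simp only [List.getElem_map, List.getElem_zip, Function.comp]
    obtain ⟨m, hm, hpe⟩ := hmemfs (fs[k]'(by rw [hfslen]; exact hk)) (List.getElem_mem _)
    have hzmem : (fs[k]'(by rw [hfslen]; exact hk), ns[k]'(by rw [hnslen]; exact hk)) ∈ fs.zip ns := by
      rw [← List.getElem_zip (h := by rw [hzlen]; exact hk)]
      exact List.getElem_mem _
    have hnewval := write_hit (fs.zip ns) (List.replicate n 0) hnodup' hbounds _ hzmem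
    rw [← hnew] at hnewval
    rw [hpe] at hnewval ⊢
    simp only [Prod.map_apply]
    simp at hnewval
    simp [hnewval]
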